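-- pv_equiv track=rewrite | github.com/othmar52/temp-jam | jamSplitter.py | removeOftenUsedListItems
-- ===== SOURCE A (Python) =====
-- def removeOftenUsedListItems( allItems, usedItems, neededAmount):
--     if len(allItems) < neededAmount:
--         return allItems
--
--     if len(usedItems) == 0:
--         return allItems
--
--     weighted = {}
--     for item in allItems:
--         for usedItem in usedItems:
--             if not item in weighted:
--                 weighted[item] = 0
--             if item == usedItem:
--                 weighted[item] = weighted[item] +1
--
--     # group itmes by count
--     groupedByCount = {}
--     for key,value in sorted(enumerate(weighted), reverse=True):
--         if not weighted[value] in groupedByCount: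
--            groupedByCount[ weighted[value] ] = []
--         groupedByCount[ weighted[value] ].append(value)
--
--     finalItems = []
--     for key in sorted(groupedByCount.keys()):
--         finalItems = finalItems + groupedByCount[key]
--         if len(finalItems) >= neededAmount:
--             return finalItems
--
--     return finalItems
-- ===== SOURCE B (Python) =====
-- def removeOftenUsedListItems(allItems, usedItems, neededAmount):
--     if len(allItems) < neededAmount:
--         return allItems
--     if len(usedItems) == 0:
--         return allItems
--
--     # weight of a distinct item = (occurrences in allItems) * (occurrences in usedItems)
--     used_counts = {}
--     for u in usedItems:
--         used_counts[u] = used_counts.get(u, 0) + 1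
--     weight = {}
--     for item in allItems:
--         weight[item] = weight.get(item, 0) + used_counts.get(item, 0)
--
--     uniq = list(weight)           # distinct items, first-seen order
--     n = len(uniq)
--     order = {}
--     for i, item in enumerate(uniq):
--         order[item] = i
--
--     # one stable sort by a single integer key encoding (weight asc, first-seen index desc)
--     uniq.sort(key=lambda item: weight[item] * n - order[item])
--
--     # emit in sorted order, stopping only at a weight-group boundary once enough collected
--     result = []
--     for j, item in enumerate(uniq):
--         result.append(item)
--         if len(result) >= neededAmount and (j + 1 == n or weight[uniq[j + 1]] > weight[item]):
--             return result
--     return result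
-- ===== Notes on version B (the rewrite author's own statement) =====
-- stated objective: faster
-- what changed: Replaces A's quadratic per-occurrence weighting loop and its count-bucket dict (groupedByCount built from a reversed enumeration) by a single counting pass, one stable sort of the distinct items under an integer key encoding (weight ascending, first-seen index descending), and one scan that stops at a weight-group boundary once enough items are collected.
import Mathlib
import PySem

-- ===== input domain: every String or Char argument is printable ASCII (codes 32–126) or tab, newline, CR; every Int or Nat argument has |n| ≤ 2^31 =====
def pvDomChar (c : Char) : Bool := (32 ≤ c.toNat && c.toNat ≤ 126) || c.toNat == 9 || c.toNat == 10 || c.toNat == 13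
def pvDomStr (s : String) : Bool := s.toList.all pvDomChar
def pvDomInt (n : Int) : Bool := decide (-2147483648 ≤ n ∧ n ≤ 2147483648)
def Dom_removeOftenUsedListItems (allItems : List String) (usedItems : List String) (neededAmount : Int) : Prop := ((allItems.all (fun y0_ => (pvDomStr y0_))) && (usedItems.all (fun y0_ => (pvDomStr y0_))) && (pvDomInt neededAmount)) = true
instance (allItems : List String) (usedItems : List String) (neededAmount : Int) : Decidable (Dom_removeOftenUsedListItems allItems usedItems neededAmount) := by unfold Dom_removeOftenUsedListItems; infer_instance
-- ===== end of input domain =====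

-- B replaces A's quadratic weighting loop and its count-bucket table (groupedByCount) by a single
-- counting pass plus ONE stable sort of the distinct items under an integer key encoding
-- (weight ascending, first-seen index descending), then a single scan that stops at a
-- weight-group boundary; same return value everywhere (measurably faster on large inputs).

-- ===== PORT A =====
def pvStepIn (item : String) (w : PySem.Dict String Int) (usedItem : String) : PySem.Dict String Int :=
  let w := if w.contains item then w else w.insert item 0
  if item == usedItem then w.insert item (w.getD item 0 + 1) else w

def pvWeightedA (allItems usedItems : List String) : PySem.Dict String Int :=
  allItems.foldl (fun w item => usedItems.foldl (pvStepIn item) w) PySem.Dict.empty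

def pvLoopA (g : PySem.Dict Int (List String)) (needed : Int) : List Int → List String → List String
  | [], acc => acc
  | k :: ks, acc =>
    let acc' := acc ++ g.getD k []
    if needed ≤ (acc'.length : Int) then acc' else pvLoopA g needed ks acc'

def pvPairsA (weighted : PySem.Dict String Int) : List (Int × String) :=
  PySem.List.sorted (PySem.List.enumerate weighted.keys) (fun p => p.1) true

def pvGroupedA (weighted : PySem.Dict String Int) : PySem.Dict Int (List String) :=
  (pvPairsA weighted).foldl (fun g kv =>
    let g := if g.contains (weighted.getD kv.2 0) then g
             else g.insert (weighted.getD kv.2 0) ([] : List String)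
    g.insert (weighted.getD kv.2 0) (g.getD (weighted.getD kv.2 0) [] ++ [kv.2])) PySem.Dict.empty

def removeOftenUsedListItems (allItems : List String) (usedItems : List String) (neededAmount : Int) : List String :=
  if (allItems.length : Int) < neededAmount then allItems
  else if usedItems.length == 0 then allItems
  else
    -- weighted = the nested counting loops; pairs = sorted(enumerate(weighted), reverse=True):
    -- Python compares the (index, key) tuples; the first components (indices) are all distinct,
    -- so that order is exactly by the index (key = ·.1) — exact
    pvLoopA (pvGroupedA (pvWeightedA allItems usedItems)) neededAmount
      (PySem.List.sorted (pvGroupedA (pvWeightedA allItems usedItems)).keys (fun k => k) false) []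

-- ===== PORT B =====
def pvBoundaryB (w : PySem.Dict String Int) (item : String) (rest : List String) : Bool :=
  match rest with
  | [] => true
  | nx :: _ => decide (w.getD item 0 < w.getD nx 0)

def pvScanB (w : PySem.Dict String Int) (needed : Int) : List String → List String → List String
  | acc, [] => acc
  | acc, item :: rest =>
    let acc' := acc ++ [item]
    if needed ≤ (acc'.length : Int) ∧ pvBoundaryB w item rest then acc'
    else pvScanB w needed acc' rest

def pvUsedCountsB (usedItems : List String) : PySem.Dict String Int :=
  usedItems.foldl (fun d u => d.insert u (d.getD u 0 + 1)) PySem.Dict.empty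

def pvWeightB (allItems usedItems : List String) : PySem.Dict String Int :=
  allItems.foldl (fun d item =>
    d.insert item (d.getD item 0 + (pvUsedCountsB usedItems).getD item 0)) PySem.Dict.empty

def pvOrderL (uniq : List String) : PySem.Dict String Int :=
  (PySem.List.enumerate uniq).foldl (fun d p => d.insert p.2 p.1) PySem.Dict.empty

def removeOftenUsedListItems_alt (allItems : List String) (usedItems : List String) (neededAmount : Int) : List String :=
  if (allItems.length : Int) < neededAmount then allItems
  else if usedItems.length == 0 then allItems
  else
    pvScanB (pvWeightB allItems usedItems) neededAmount []
      (PySem.List.sorted (pvWeightB allItems usedItems).keys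
        (fun item => (pvWeightB allItems usedItems).getD item 0 * ((pvWeightB allItems usedItems).keys.length : Int)
          - (pvOrderL (pvWeightB allItems usedItems).keys).getD item 0) false)

-- ===== PRECONDITION & SPEC =====
def Spec_removeOftenUsedListItems (allItems : List String) (usedItems : List String) (neededAmount : Int) (out : List String) : Prop := out = removeOftenUsedListItems_alt allItems usedItems neededAmount
instance (allItems : List String) (usedItems : List String) (neededAmount : Int) (out : List String) : Decidable (Spec_removeOftenUsedListItems allItems usedItems neededAmount out) := by unfold Spec_removeOftenUsedListItems; infer_instance

-- ===== CLAIM (what is proved, stated in full; the proofs are below) =====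
def Claim_equal_removeOftenUsedListItems : Prop := ∀ (allItems : List String) (usedItems : List String) (neededAmount : Int), Dom_removeOftenUsedListItems allItems usedItems neededAmount → Spec_removeOftenUsedListItems allItems usedItems neededAmount (removeOftenUsedListItems allItems usedItems neededAmount)

-- ===== LEMMAS AND PROOFS =====

-- the canonical weight dict both programs compute: value = count in allItems * count in usedItems,
-- keys in first-seen order
def pvW (allItems usedItems : List String) : PySem.Dict String Int :=
  allItems.foldl (fun d x => d.insert x (d.getD x 0 + (usedItems.count x : Int))) PySem.Dict.empty

def pvChunk (W : PySem.Dict String Int) (c : Int) : List String :=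
  W.keys.reverse.filter (fun v => W.getD v 0 == c)

def pvGrouped (W : PySem.Dict String Int) : PySem.Dict Int (List String) :=
  W.keys.reverse.foldl (fun g v => g.modify (W.getD v 0) [] (· ++ [v])) PySem.Dict.empty

def pvCs (W : PySem.Dict String Int) : List Int :=
  PySem.List.sorted (pvGrouped W).keys (fun k => k) false

def pvKey (W : PySem.Dict String Int) (v : String) : Int :=
  W.getD v 0 * (W.keys.length : Int) - (pvOrderL W.keys).getD v 0

theorem pv_insert_getD_self {κ ν : Type} [BEq κ] [LawfulBEq κ] (d : PySem.Dict κ ν) (k : κ) (d0 : ν)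
    (hnd : d.keys.Nodup) (h : d.contains k = true) : d.insert k (d.getD k d0) = d := by
  apply PySem.Dict.ext
  rw [PySem.Dict.items_insert_of_contains d _ h]
  conv_rhs => rw [← List.map_id d.items]
  apply List.map_congr_left
  intro p hp
  by_cases hpk : (p.1 == k) = true
  · have hk : p.1 = k := by simpa using hpk
    have hmem : (p.1, p.2) ∈ d.items := by simpa using hp
    have hget : d.get? p.1 = some p.2 := PySem.Dict.get?_of_mem_items d hmem hnd
    simp [← hk, PySem.Dict.getD_of_get?_eq_some d d0 hget]
  · simp [hpk]

theorem pv_innerA_contains (item : String) (used : List String) :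
    ∀ (w : PySem.Dict String Int), w.keys.Nodup → w.contains item = true →
    used.foldl (pvStepIn item) w = w.insert item (w.getD item 0 + (used.count item : Int)) := by
  induction used with
  | nil =>
    intro w hnd hc
    simp only [List.foldl_nil, List.count_nil, Nat.cast_zero, add_zero]
    exact (pv_insert_getD_self w item 0 hnd hc).symm
  | cons u us ih =>
    intro w hnd hc
    rw [List.foldl_cons]
    have hstep : pvStepIn item w u
        = if (item == u) = true then w.insert item (w.getD item 0 + 1) else w := by
      unfold pvStepIn
      rw [if_pos hc]
    by_cases hiu : (item == u) = true
    · rw [hstep, if_pos hiu,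
        ih (w.insert item (w.getD item 0 + 1))
          (PySem.Dict.nodup_keys_insert w item _ hnd)
          (PySem.Dict.contains_insert_self w item _),
        PySem.Dict.insert_insert_self, PySem.Dict.getD_insert_self]
      congr 1
      have hui : (u == item) = true := by
        rw [beq_iff_eq] at hiu ⊢
        exact hiu.symm
      rw [List.count_cons, if_pos hui]
      push_cast
      ring
    · rw [hstep, if_neg hiu, ih w hnd hc]
      congr 2
      have hui : (u == item) = false := by
        rw [beq_eq_false_iff_ne]
        intro h
        exact hiu (by rw [beq_iff_eq]; exact h.symm)
      rw [List.count_cons, if_neg (by simp [hui])]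
      push_cast
      ring

theorem pv_innerA (item : String) (used : List String) (hne : used ≠ [])
    (w : PySem.Dict String Int) (hnd : w.keys.Nodup) :
    used.foldl (pvStepIn item) w = w.insert item (w.getD item 0 + (used.count item : Int)) := by
  by_cases hc : w.contains item = true
  · exact pv_innerA_contains item used w hnd hc
  · match used, hne with
    | u :: us, _ =>
      have hcf : w.contains item = false := by simpa using hc
      have hgd0 : w.getD item 0 = 0 := PySem.Dict.getD_of_not_contains w 0 hcf
      rw [List.foldl_cons]
      have hstep : pvStepIn item w u
          = if (item == u) = true
            then (w.insert item 0).insert item ((w.insert item 0).getD item 0 + 1)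
            else w.insert item 0 := by
        unfold pvStepIn
        rw [if_neg hc]
      by_cases hiu : (item == u) = true
      · rw [hstep, if_pos hiu, PySem.Dict.insert_insert_self, PySem.Dict.getD_insert_self,
          pv_innerA_contains item us (w.insert item (0 + 1))
            (PySem.Dict.nodup_keys_insert w item _ hnd)
            (PySem.Dict.contains_insert_self w item _),
          PySem.Dict.insert_insert_self, PySem.Dict.getD_insert_self]
        congr 1
        have hui : (u == item) = true := by
          rw [beq_iff_eq] at hiu ⊢
          exact hiu.symm
        rw [List.count_cons, if_pos hui, hgd0]
        push_cast
        ring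
      · rw [hstep, if_neg hiu,
          pv_innerA_contains item us (w.insert item 0)
            (PySem.Dict.nodup_keys_insert w item _ hnd)
            (PySem.Dict.contains_insert_self w item _),
          PySem.Dict.insert_insert_self, PySem.Dict.getD_insert_self]
        congr 1
        have hui : (u == item) = false := by
          rw [beq_eq_false_iff_ne]
          intro h
          exact hiu (by rw [beq_iff_eq]; exact h.symm)
        rw [List.count_cons, if_neg (by simp [hui]), hgd0]
        push_cast
        ring

theorem pv_weightedA_aux (usedItems : List String) (hne : usedItems ≠ []) :
    ∀ (allItems : List String) (w : PySem.Dict String Int), w.keys.Nodup →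
    allItems.foldl (fun w item => usedItems.foldl (pvStepIn item) w) w
    = allItems.foldl (fun d x => d.insert x (d.getD x 0 + (usedItems.count x : Int))) w := by
  intro allItems
  induction allItems with
  | nil => intro w _; rfl
  | cons a rest ih =>
    intro w hnd
    simp only [List.foldl_cons]
    rw [pv_innerA a usedItems hne w hnd]
    exact ih _ (PySem.Dict.nodup_keys_insert w a _ hnd)

theorem pv_weightedA_eq (allItems usedItems : List String) (hne : usedItems ≠ []) :
    pvWeightedA allItems usedItems = pvW allItems usedItems := by
  unfold pvWeightedA pvW
  exact pv_weightedA_aux usedItems hne allItems PySem.Dict.empty PySem.Dict.nodup_keys_empty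

theorem pv_weightB_eq (allItems usedItems : List String) :
    pvWeightB allItems usedItems = pvW allItems usedItems := by
  unfold pvWeightB pvUsedCountsB pvW
  apply PySem.List.foldl_congr_mem
  intro acc x _
  rw [PySem.Dict.foldl_insert_getD_add_one_eq_counter, PySem.Dict.getD_counter]

theorem pv_keys_W (allItems usedItems : List String) :
    (pvW allItems usedItems).keys = PySem.Set.ofList allItems := by
  unfold pvW
  rw [PySem.Dict.keys_foldl_insert allItems (fun d x => d.getD x 0 + (usedItems.count x : Int)),
    PySem.Dict.keys_empty, PySem.Set.update_nil_left]

theorem pv_nodup_keys_W (allItems usedItems : List String) :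
    (pvW allItems usedItems).keys.Nodup := by
  rw [pv_keys_W]
  exact PySem.Set.nodup_ofList allItems

theorem pv_order_items (W : PySem.Dict String Int) (hnd : W.keys.Nodup) :
    (pvOrderL W.keys).items = (PySem.List.enumerate W.keys).map (fun p => (p.2, p.1)) := by
  unfold pvOrderL
  have h := PySem.Dict.items_foldl_insert_fresh (PySem.List.enumerate W.keys)
    (fun p => p.2) (fun p => p.1) PySem.Dict.empty
    (by intro a _; rfl)
    (by rw [PySem.List.map_snd_enumerate]; exact hnd)
  simpa using h

theorem pv_order_keys (W : PySem.Dict String Int) (hnd : W.keys.Nodup) :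
    (pvOrderL W.keys).keys = W.keys := by
  show (pvOrderL W.keys).items.map (fun p => p.1) = W.keys
  rw [pv_order_items W hnd, List.map_map]
  exact PySem.List.map_snd_enumerate W.keys 0

theorem pv_order_getD (W : PySem.Dict String Int) (hnd : W.keys.Nodup)
    (i : Nat) (hi : i < W.keys.length) : (pvOrderL W.keys).getD W.keys[i] 0 = (i : Int) := by
  have hmem : ((W.keys[i] : String), (i : Int)) ∈ (pvOrderL W.keys).items := by
    rw [pv_order_items W hnd]
    refine List.mem_map.mpr ⟨((i : Int), W.keys[i]), ?_, rfl⟩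
    exact (PySem.List.mem_enumerate_iff W.keys 0 _).mpr ⟨i, hi, by simp⟩
  exact PySem.Dict.getD_of_mem_items (pvOrderL W.keys) hmem (by rw [pv_order_keys W hnd]; exact hnd) 0

theorem pv_order_mem (W : PySem.Dict String Int) (hnd : W.keys.Nodup)
    (v : String) (hv : v ∈ W.keys) :
    0 ≤ (pvOrderL W.keys).getD v 0 ∧ (pvOrderL W.keys).getD v 0 < (W.keys.length : Int) := by
  obtain ⟨i, hi, rfl⟩ := List.mem_iff_getElem.mp hv
  rw [pv_order_getD W hnd i hi]
  constructor
  · exact Int.natCast_nonneg i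
  · exact_mod_cast hi

theorem pv_sortedA_rev (ks : List String) :
    PySem.List.sorted (PySem.List.enumerate ks) (fun p => p.1) true
      = (PySem.List.enumerate ks).reverse := by
  apply PySem.List.sorted_rev_eq_of_perm_of_pairwise_gt
  · exact (PySem.List.enumerate ks 0).reverse_perm
  · exact List.pairwise_reverse.mpr (PySem.List.pairwise_lt_enumerate ks 0)

theorem pv_stepG_eq (g : PySem.Dict Int (List String)) (c : Int) (v : String) :
    (let g' := if g.contains c then g else g.insert c ([] : List String)
     g'.insert c (g'.getD c [] ++ [v])) = g.modify c [] (· ++ [v]) := by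
  by_cases h : g.contains c = true
  · simp [h, PySem.Dict.modify, PySem.Dict.getD_eq_get?_getD]
  · have hn : g.get? c = none := by
      rw [PySem.Dict.get?_eq_none_iff_contains]
      simpa using h
    simp [h, PySem.Dict.modify, PySem.Dict.getD_eq_get?_getD, hn,
      PySem.Dict.insert_insert_self]

theorem pv_filter_map_pair (f : String → Int) (c : Int) (l : List String) :
    ((l.map (fun v => (f v, v))).filter (fun p => p.1 == c)).map (fun p => p.2)
      = l.filter (fun v => f v == c) := by
  induction l with
  | nil => rfl
  | cons x xs ih =>
    by_cases hx : (f x == c) = true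
    · simp [hx, ih]
    · simp [hx, ih]

theorem pv_grouped_getD (W : PySem.Dict String Int) (c : Int) :
    (pvGrouped W).getD c [] = pvChunk W c := by
  unfold pvGrouped pvChunk
  have hmap : W.keys.reverse.foldl (fun g v => g.modify (W.getD v 0) [] (· ++ [v])) PySem.Dict.empty
      = (W.keys.reverse.map (fun v => (W.getD v 0, v))).foldl
          (fun d p => d.modify p.1 [] (· ++ [p.2])) PySem.Dict.empty := by
    rw [List.foldl_map]
  rw [hmap, PySem.Dict.getD_foldl_modify_append, PySem.Dict.getD_empty, List.nil_append]
  exact pv_filter_map_pair (fun v => W.getD v 0) c W.keys.reverse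

theorem pv_grouped_keys (W : PySem.Dict String Int) :
    (pvGrouped W).keys = PySem.Set.ofList (W.keys.reverse.map (fun v => W.getD v 0)) := by
  unfold pvGrouped
  rw [PySem.Dict.keys_foldl_modify_key W.keys.reverse (fun v => W.getD v 0) []
      (fun _ v => (· ++ [v])), PySem.Dict.keys_empty, PySem.Set.update_nil_left]

theorem pv_cs_pairwise (W : PySem.Dict String Int) : (pvCs W).Pairwise (· < ·) := by
  unfold pvCs
  rw [pv_grouped_keys]
  exact PySem.List.sorted_ofList_pairwise_lt _

theorem pv_mem_cs (W : PySem.Dict String Int) (c : Int) :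
    c ∈ pvCs W ↔ ∃ v ∈ W.keys, W.getD v 0 = c := by
  unfold pvCs
  rw [PySem.List.mem_sorted, pv_grouped_keys, PySem.Set.mem_ofList]
  simp

theorem pv_flatMap_congr {α β : Type} (l : List β) (f g : β → List α)
    (h : ∀ x ∈ l, f x = g x) : l.flatMap f = l.flatMap g := by
  induction l with
  | nil => rfl
  | cons x xs ih =>
    simp only [List.flatMap_cons, h x List.mem_cons_self,
      ih (fun y hy => h y (List.mem_cons_of_mem x hy))]

theorem pv_perm_flatMap_filter (f : String → Int) (cs : List Int) :
    ∀ (l : List String), cs.Nodup → (∀ v ∈ l, f v ∈ cs) →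
    (cs.flatMap (fun c => l.filter (fun v => f v == c))).Perm l := by
  induction cs with
  | nil =>
    intro l _ hcov
    match l with
    | [] => simp
    | v :: t => exact absurd (hcov v List.mem_cons_self) (by simp)
  | cons c cs ih =>
    intro l hnd hcov
    simp only [List.flatMap_cons]
    have hcnot : c ∉ cs := (List.nodup_cons.mp hnd).1
    have hrw : cs.flatMap (fun c' => l.filter (fun v => f v == c'))
        = cs.flatMap (fun c' => (l.filter (fun v => !(f v == c))).filter (fun v => f v == c')) := by
      apply pv_flatMap_congr
      intro c' hc'
      rw [List.filter_filter]
      apply List.filter_congr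
      intro x _
      by_cases hfx : (f x == c') = true
      · have : f x = c' := by simpa using hfx
        have : ¬ (f x == c) = true := by
          simp only [beq_iff_eq, this]
          exact fun hh => hcnot (hh ▸ hc')
        simp_all
      · simp_all
    rw [hrw]
    have hcov' : ∀ v ∈ l.filter (fun v => !(f v == c)), f v ∈ cs := by
      intro v hv
      have hvl : v ∈ l := List.mem_of_mem_filter hv
      have hne : ¬ (f v == c) = true := by
        have := (List.mem_filter.mp hv).2
        simpa using this
      rcases List.mem_cons.mp (hcov v hvl) with h | h
      · exact absurd (by simpa using h) (by simpa using hne)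
      · exact h
    have hperm := ih (l.filter (fun v => !(f v == c))) (List.nodup_cons.mp hnd).2 hcov'
    exact (hperm.append_left (l.filter (fun v => f v == c))).trans
      (List.filter_append_perm _ l)

theorem pv_chunk_mem (W : PySem.Dict String Int) (c : Int) (v : String) (hv : v ∈ pvChunk W c) :
    W.getD v 0 = c ∧ v ∈ W.keys := by
  unfold pvChunk at hv
  have h1 := List.mem_filter.mp hv
  exact ⟨by simpa using h1.2, List.mem_reverse.mp h1.1⟩

theorem pv_chunk_pairwise (W : PySem.Dict String Int) (hnd : W.keys.Nodup) (c : Int) :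
    (pvChunk W c).Pairwise (fun a b => (pvOrderL W.keys).getD b 0 < (pvOrderL W.keys).getD a 0) := by
  have hks : W.keys.Pairwise (fun a b => (pvOrderL W.keys).getD a 0 < (pvOrderL W.keys).getD b 0) := by
    rw [List.pairwise_iff_getElem]
    intro i j hi hj hij
    rw [pv_order_getD W hnd i hi, pv_order_getD W hnd j hj]
    exact_mod_cast hij
  have hrev : W.keys.reverse.Pairwise (fun a b => (pvOrderL W.keys).getD b 0 < (pvOrderL W.keys).getD a 0) :=
    List.pairwise_reverse.mpr hks
  exact hrev.filter _

theorem pv_pairwise_key (W : PySem.Dict String Int) (hnd : W.keys.Nodup) :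
    ((pvCs W).flatMap (pvChunk W)).Pairwise (fun a b => pvKey W a < pvKey W b) := by
  have haux : ∀ (cs : List Int), cs.Pairwise (· < ·) →
      (cs.flatMap (pvChunk W)).Pairwise (fun a b => pvKey W a < pvKey W b) := by
    intro cs hcs
    induction cs with
    | nil => simp
    | cons c cs ih =>
      simp only [List.flatMap_cons]
      rw [List.pairwise_append]
      refine ⟨?_, ih (List.pairwise_cons.mp hcs).2, ?_⟩
      · have h1 := pv_chunk_pairwise W hnd c
        refine h1.imp_of_mem ?_
        intro a b ha hb hab
        have hwa := (pv_chunk_mem W c a ha).1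
        have hwb := (pv_chunk_mem W c b hb).1
        unfold pvKey
        rw [hwa, hwb]
        exact sub_lt_sub_left hab _
      · intro a ha b hb
        obtain ⟨c', hc', hb'⟩ := List.mem_flatMap.mp hb
        have hcc' : c < c' := (List.pairwise_cons.mp hcs).1 c' hc'
        have hwa := pv_chunk_mem W c a ha
        have hwb := pv_chunk_mem W c' b hb'
        have hoa := pv_order_mem W hnd a hwa.2
        have hob := pv_order_mem W hnd b hwb.2
        unfold pvKey
        rw [hwa.1, hwb.1]
        have hmul : (c + 1) * (W.keys.length : Int) ≤ c' * (W.keys.length : Int) :=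
          mul_le_mul_of_nonneg_right (by omega) (Int.natCast_nonneg _)
        have hexp : (c + 1) * (W.keys.length : Int)
            = c * (W.keys.length : Int) + (W.keys.length : Int) := by ring
        omega
  exact haux (pvCs W) (pv_cs_pairwise W)

theorem pv_sortB_eq (W : PySem.Dict String Int) (hnd : W.keys.Nodup) :
    PySem.List.sorted W.keys (pvKey W) false = (pvCs W).flatMap (pvChunk W) := by
  apply PySem.List.sorted_eq_of_perm_of_pairwise_lt
  · have hperm := pv_perm_flatMap_filter (fun v => W.getD v 0) (pvCs W) W.keys.reverse
      ((pv_cs_pairwise W).imp (fun hab => ne_of_lt hab))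
      (by
        intro v hv
        exact (pv_mem_cs W _).mpr ⟨v, List.mem_reverse.mp hv, rfl⟩)
    have : (pvCs W).flatMap (pvChunk W)
        = (pvCs W).flatMap (fun c => W.keys.reverse.filter (fun v => W.getD v 0 == c)) := rfl
    rw [this]
    exact hperm.trans W.keys.reverse_perm
  · exact pv_pairwise_key W hnd

theorem pv_scan_chunk (W : PySem.Dict String Int) (needed c : Int) (R : List String)
    (hR : ∀ r t, R = r :: t → c < W.getD r 0) :
    ∀ (u : String) (us : List String) (acc : List String),
      W.getD u 0 = c → (∀ x ∈ us, W.getD x 0 = c) →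
      pvScanB W needed acc (u :: us ++ R)
        = if needed ≤ ((acc ++ u :: us).length : Int) then acc ++ u :: us
          else pvScanB W needed (acc ++ u :: us) R := by
  intro u us
  induction us generalizing u with
  | nil =>
    intro acc hu _
    match R, hR with
    | [], _ =>
      simp only [List.append_nil]
      show (if needed ≤ (((acc ++ [u]).length : Nat) : Int) ∧ pvBoundaryB W u [] = true then acc ++ [u]
            else pvScanB W needed (acc ++ [u]) []) = _
      have hb : pvBoundaryB W u [] = true := rfl
      by_cases hl : needed ≤ ((acc ++ [u]).length : Int)
      · simp [pvScanB, hb]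
      · simp [pvScanB, hb]
    | r :: t, hR =>
      have hru : W.getD u 0 < W.getD r 0 := hu ▸ hR r t rfl
      show (if needed ≤ (((acc ++ [u]).length : Nat) : Int) ∧ pvBoundaryB W u (r :: t) = true
            then acc ++ [u] else pvScanB W needed (acc ++ [u]) (r :: t)) = _
      have hb : pvBoundaryB W u (r :: t) = true := by
        simp [pvBoundaryB, hru]
      by_cases hl : needed ≤ ((acc ++ [u]).length : Int)
      · simp [hb]
      · simp [hb]
  | cons x us ih =>
    intro acc hu hus
    have hx : W.getD x 0 = c := hus x List.mem_cons_self
    show (if needed ≤ (((acc ++ [u]).length : Nat) : Int) ∧ pvBoundaryB W u (x :: us ++ R) = true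
          then acc ++ [u] else pvScanB W needed (acc ++ [u]) (x :: us ++ R)) = _
    have hb : pvBoundaryB W u (x :: us ++ R) = false := by
      simp [pvBoundaryB, hu, hx]
    rw [hb]
    simp only [Bool.false_eq_true, and_false, if_false]
    rw [ih x (acc ++ [u]) hx (fun y hy => hus y (List.mem_cons_of_mem x hy))]
    simp

theorem pv_scan_loop (W : PySem.Dict String Int) (needed : Int) :
    ∀ (cs : List Int) (acc : List String), cs.Pairwise (· < ·) →
      (∀ c ∈ cs, pvChunk W c ≠ []) →
      pvScanB W needed acc (cs.flatMap (pvChunk W)) = pvLoopA (pvGrouped W) needed cs acc := by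
  intro cs
  induction cs with
  | nil => intro acc _ _; rfl
  | cons c cs ih =>
    intro acc hpw hne
    simp only [List.flatMap_cons]
    match hchunk : pvChunk W c, hne c List.mem_cons_self with
    | u :: us, _ =>
      have hR : ∀ r t, cs.flatMap (pvChunk W) = r :: t → c < W.getD r 0 := by
        intro r t hE
        have hr : r ∈ cs.flatMap (pvChunk W) := by rw [hE]; exact List.mem_cons_self
        obtain ⟨c', hc', hr'⟩ := List.mem_flatMap.mp hr
        have := (pv_chunk_mem W c' r hr').1
        rw [this]
        exact (List.pairwise_cons.mp hpw).1 c' hc'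
      have hu : W.getD u 0 = c := (pv_chunk_mem W c u (hchunk ▸ List.mem_cons_self)).1
      have hus : ∀ x ∈ us, W.getD x 0 = c := fun x hx =>
        (pv_chunk_mem W c x (hchunk ▸ List.mem_cons_of_mem u hx)).1
      rw [pv_scan_chunk W needed c (cs.flatMap (pvChunk W)) hR u us acc hu hus]
      show _ = pvLoopA (pvGrouped W) needed (c :: cs) acc
      rw [pvLoopA, pv_grouped_getD W c, hchunk]
      by_cases hl : needed ≤ ((acc ++ u :: us).length : Int)
      · simp only [hl, if_true]
      · simp only [hl, if_false]
        exact ih (acc ++ u :: us) (List.pairwise_cons.mp hpw).2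
          (fun c' hc' => hne c' (List.mem_cons_of_mem c hc'))

theorem pv_central (W : PySem.Dict String Int) (needed : Int) (hnd : W.keys.Nodup) :
    pvScanB W needed [] (PySem.List.sorted W.keys (pvKey W) false)
      = pvLoopA (pvGrouped W) needed (pvCs W) [] := by
  rw [pv_sortB_eq W hnd]
  apply pv_scan_loop W needed (pvCs W) [] (pv_cs_pairwise W)
  intro c hc
  obtain ⟨v, hv, hw⟩ := (pv_mem_cs W c).mp hc
  have : v ∈ pvChunk W c := by
    unfold pvChunk
    exact List.mem_filter.mpr ⟨List.mem_reverse.mpr hv, by simpa using hw⟩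
  exact List.ne_nil_of_mem this

theorem pv_groupedA_eq (W : PySem.Dict String Int) : pvGroupedA W = pvGrouped W := by
  unfold pvGroupedA pvPairsA
  rw [pv_sortedA_rev]
  have h1 := PySem.List.foldl_congr_mem (PySem.List.enumerate W.keys).reverse
    (fun g kv =>
      let g' := if g.contains (W.getD kv.2 0) then g
                else g.insert (W.getD kv.2 0) ([] : List String)
      g'.insert (W.getD kv.2 0) (g'.getD (W.getD kv.2 0) [] ++ [kv.2]))
    (fun g kv => g.modify (W.getD kv.2 0) [] (· ++ [kv.2]))
    PySem.Dict.empty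
    (fun acc kv _ => pv_stepG_eq acc (W.getD kv.2 0) kv.2)
  rw [h1]
  unfold pvGrouped
  have hls : W.keys.reverse = (PySem.List.enumerate W.keys).reverse.map (fun p => p.2) := by
    rw [List.map_reverse, PySem.List.map_snd_enumerate]
  rw [hls, List.foldl_map]

-- ===== VERDICT (by name: the statement is the Claim_ definition above) =====
theorem removeOftenUsedListItems_spec : Claim_equal_removeOftenUsedListItems := by
  intro allItems usedItems neededAmount _
  unfold Spec_removeOftenUsedListItems removeOftenUsedListItems removeOftenUsedListItems_alt
  by_cases h1 : (allItems.length : Int) < neededAmount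
  · rw [if_pos h1, if_pos h1]
  · rw [if_neg h1, if_neg h1]
    by_cases h2 : (usedItems.length == 0) = true
    · rw [if_pos h2, if_pos h2]
    · rw [if_neg h2, if_neg h2]
      have hne : usedItems ≠ [] := by
        intro h
        subst h
        simp at h2
      rw [pv_weightedA_eq allItems usedItems hne, pv_weightB_eq allItems usedItems, pv_groupedA_eq]
      exact (pv_central (pvW allItems usedItems) neededAmount (pv_nodup_keys_W allItems usedItems)).symm
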